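-- pv_equiv track=rewrite | github.com/NweTwist/DiplomFOR | export_first_chapter_docx.py | _split_inline_code
-- ===== SOURCE A (Python) =====
-- from typing import List, Optional, Tuple
--
-- def _split_inline_code(text: str) -> List[Tuple[str, bool]]:
--     """Split a line by inline code spans marked with backticks.
--
--     Returns list of (chunk, is_code).
--     """
--     parts: List[Tuple[str, bool]] = []
--     if "`" not in text:
--         return [(text, False)]
--
--     buf = ""
--     in_code = False
--     for ch in text:
--         if ch == "`":
--             if buf:
--                 parts.append((buf, in_code))
--                 buf = ""
--             in_code = not in_code
--             continue
--         buf += ch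
--     if buf:
--         parts.append((buf, in_code))
--     return parts
-- ===== SOURCE B (Python) =====
-- from typing import List, Tuple
--
-- def _split_inline_code(text: str) -> List[Tuple[str, bool]]:
--     """Split a line by inline code spans marked with backticks.
--
--     Returns list of (chunk, is_code).
--     """
--     if "`" not in text:
--         return [(text, False)]
--     return [(seg, i % 2 == 1) for i, seg in enumerate(text.split("`")) if seg]
-- ===== Notes on version B (the rewrite author's own statement) =====
-- stated objective: idiomatic
-- what changed: Replaces the character-by-character buffer/toggle loop with a single str.split on the backtick followed by an index-parity comprehension over the segments (odd-indexed segments are code).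
import Mathlib
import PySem

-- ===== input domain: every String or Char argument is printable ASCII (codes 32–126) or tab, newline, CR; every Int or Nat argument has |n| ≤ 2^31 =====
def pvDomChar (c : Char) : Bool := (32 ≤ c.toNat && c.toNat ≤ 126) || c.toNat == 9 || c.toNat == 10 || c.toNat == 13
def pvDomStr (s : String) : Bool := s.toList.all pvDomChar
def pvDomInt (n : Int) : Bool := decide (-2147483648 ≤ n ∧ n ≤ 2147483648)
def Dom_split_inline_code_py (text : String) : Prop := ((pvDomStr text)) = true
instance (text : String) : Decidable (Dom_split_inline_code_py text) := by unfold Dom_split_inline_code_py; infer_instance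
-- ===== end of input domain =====

-- B replaces A's per-character buffer/toggle loop with one split on '`' plus an index-parity pass (idiomatic rewrite, same result).


-- ===== PORT A =====
-- the 'for ch in text' loop: state = (parts, buf, in_code), exactly as in A
def splitInlineCodeAGo : List Char → List (String × Bool) → List Char → Bool → List (String × Bool)
  | [], parts, buf, in_code =>
      if buf ≠ [] then parts ++ [(String.ofList buf, in_code)] else parts
  | c :: rest, parts, buf, in_code =>
      if c = '`' then
        splitInlineCodeAGo rest (if buf ≠ [] then parts ++ [(String.ofList buf, in_code)] else parts) [] (!in_code)
      else
        splitInlineCodeAGo rest parts (buf ++ [c]) in_code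

def split_inline_code_py (text : String) : List (String × Bool) :=
  if PySem.Str.isIn "`" text = false then [(text, false)]
  else splitInlineCodeAGo text.toList [] [] false

-- ===== PORT B =====
def split_inline_code_py_alt (text : String) : List (String × Bool) :=
  if PySem.Str.isIn "`" text = false then [(text, false)]
  else
    -- text.split("`") never raises (non-empty separator), hence the getD
    let segments := (PySem.Str.split? text "`").getD []
    ((PySem.List.enumerate segments).filter (fun p => p.2 ≠ "")).map
      (fun p => (p.2, PySem.Int.mod p.1 2 == 1))

-- ===== PRECONDITION & SPEC =====
def Spec_split_inline_code_py (text : String) (out : List (String × Bool)) : Prop := out = split_inline_code_py_alt text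
instance (text : String) (out : List (String × Bool)) : Decidable (Spec_split_inline_code_py text out) := by unfold Spec_split_inline_code_py; infer_instance

-- ===== CLAIM (what is proved, stated in full; the proofs are below) =====
def Claim_equal_split_inline_code_py : Prop := ∀ (text : String), Dom_split_inline_code_py text → Spec_split_inline_code_py text (split_inline_code_py text)

-- ===== LEMMAS AND PROOFS =====

-- the segments of l split on '`' (empty segments kept), recursively
def tickSegs : List Char → List (List Char)
  | [] => [[]]
  | c :: rest =>
      if c = '`' then [] :: tickSegs rest
      else (c :: (tickSegs rest).headI) :: (tickSegs rest).tail

lemma tickSegs_decomp (l : List Char) : tickSegs l = (tickSegs l).headI :: (tickSegs l).tail := by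
  cases l with
  | nil => rfl
  | cons c rest => simp only [tickSegs]; split_ifs <;> rfl

lemma splitOn_go_tick (fuel : Nat) :
    ∀ (l cur : List Char) (accs : List (List Char)), l.length < fuel →
    PySem.Chars.splitOn.go ['`'] fuel l cur accs =
      accs.reverse ++ (cur.reverse ++ (tickSegs l).headI) :: (tickSegs l).tail := by
  induction fuel with
  | zero => intro l cur accs h; omega
  | succ fuel ih =>
    intro l cur accs h
    cases l with
    | nil => simp [PySem.Chars.splitOn.go, tickSegs]
    | cons c rest =>
      by_cases hc : c = '`'
      · subst hc
        have step : PySem.Chars.splitOn.go ['`'] (fuel+1) ('`' :: rest) cur accs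
            = PySem.Chars.splitOn.go ['`'] fuel rest [] (cur.reverse :: accs) := by
          simp [PySem.Chars.splitOn.go]
        rw [step, ih rest [] (cur.reverse :: accs) (by simpa using h)]
        simp [tickSegs]
        rw [← tickSegs_decomp]
      · have step : PySem.Chars.splitOn.go ['`'] (fuel+1) (c :: rest) cur accs
            = PySem.Chars.splitOn.go ['`'] fuel rest (c :: cur) accs := by
          simp [PySem.Chars.splitOn.go, List.isPrefixOf]
          exact fun hc' => absurd hc'.symm hc
        rw [step, ih rest (c :: cur) accs (by simpa using h)]
        simp [tickSegs, hc]

lemma splitOn_tick (l : List Char) : PySem.Chars.splitOn l ['`'] = tickSegs l := by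
  unfold PySem.Chars.splitOn
  rw [splitOn_go_tick (l.length + 1) l [] [] (by omega)]
  simpa using (tickSegs_decomp l).symm

-- alternating tagger: the value both programs compute from the segment list
def tickTag : Bool → List (List Char) → List (String × Bool)
  | _, [] => []
  | ic, s :: rest => (if s ≠ [] then [(String.ofList s, ic)] else []) ++ tickTag (!ic) rest

lemma tickTag_cons (ic : Bool) (x : List Char) (L : List (List Char)) :
    tickTag ic (x :: L) = (if x ≠ [] then [(String.ofList x, ic)] else []) ++ tickTag (!ic) L := rfl

lemma aGo_eq_tag (l : List Char) :
    ∀ (parts : List (String × Bool)) (buf : List Char) (ic : Bool),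
    splitInlineCodeAGo l parts buf ic =
      parts ++ tickTag ic ((buf ++ (tickSegs l).headI) :: (tickSegs l).tail) := by
  induction l with
  | nil =>
    intro parts buf ic
    simp only [splitInlineCodeAGo, tickSegs, List.headI_cons, List.tail_cons, List.append_nil,
      tickTag_cons]
    split_ifs <;> simp [tickTag]
  | cons c rest ih =>
    intro parts buf ic
    by_cases hc : c = '`'
    · subst hc
      show splitInlineCodeAGo rest
          (if buf ≠ [] then parts ++ [(String.ofList buf, ic)] else parts) [] (!ic) = _
      rw [ih, show tickSegs ('`' :: rest) = [] :: tickSegs rest from by simp [tickSegs]]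
      simp only [List.headI_cons, List.tail_cons, List.nil_append, List.append_nil]
      rw [← tickSegs_decomp, tickTag_cons ic buf (tickSegs rest)]
      split_ifs with hb <;> simp
    · simp only [splitInlineCodeAGo, tickSegs, if_neg hc]
      rw [ih]
      simp only [List.headI_cons, List.tail_cons, List.append_assoc, List.cons_append,
        List.nil_append]

lemma mod_two_beq (k : Nat) : (PySem.Int.mod (k : Int) 2 == 1) = decide (k % 2 = 1) := by
  have : PySem.Int.mod (k : Int) 2 = ((k % 2 : Nat) : Int) := by
    exact_mod_cast PySem.Int.mod_natCast k 2
  rw [this]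
  rcases Nat.mod_two_eq_zero_or_one k with h | h <;> simp [h]

lemma parity_succ (k : Nat) : decide ((k + 1) % 2 = 1) = !decide (k % 2 = 1) := by
  rcases Nat.mod_two_eq_zero_or_one k with h | h <;> simp [Nat.add_mod, h]

lemma ofList_ne_empty_iff (s : List Char) : (String.ofList s ≠ "") ↔ s ≠ [] := by
  constructor
  · intro h hs; exact h (by simp [hs])
  · intro h hs; exact h (by simpa using congrArg String.toList hs)

lemma b_pass_eq_tag (sl : List (List Char)) :
    ∀ (k : Nat),
    ((PySem.List.enumerate (sl.map String.ofList) (k : Int)).filter (fun p => p.2 ≠ "")).map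
        (fun p => (p.2, PySem.Int.mod p.1 2 == 1)) =
      tickTag (decide (k % 2 = 1)) sl := by
  induction sl with
  | nil => intro k; simp [PySem.List.enumerate_nil, tickTag]
  | cons s rest ih =>
    intro k
    have hcast : ((k : Int) + 1) = ((k + 1 : Nat) : Int) := by push_cast; ring
    simp only [List.map_cons]
    rw [PySem.List.enumerate_cons, List.filter_cons, hcast, tickTag_cons, ← parity_succ]
    by_cases hs : s = []
    · subst hs
      have h0 : (decide ((String.ofList ([] : List Char)) ≠ "")) = false := by decide
      rw [h0, if_neg Bool.false_ne_true, ih (k + 1)]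
      simp
    · have h1 : (decide ((String.ofList s) ≠ "")) = true := by
        simpa using (ofList_ne_empty_iff s).mpr hs
      rw [h1, if_pos rfl, List.map_cons, ih (k + 1), mod_two_beq]
      simp [hs]

lemma split?_tick (text : String) :
    (PySem.Str.split? text "`").getD [] = (tickSegs text.toList).map String.ofList := by
  have h := PySem.Str.split?_map text "`"
  rw [show ("`" : String).toList = ['`'] from rfl] at h
  rw [show PySem.Chars.split? text.toList ['`'] = some (tickSegs text.toList) by
        simp [PySem.Chars.split?, splitOn_tick]] at h
  cases hL : PySem.Str.split? text "`" with
  | none => rw [hL] at h; simp at h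
  | some L =>
    rw [hL] at h
    simp only [Option.map_some, Option.some.injEq] at h
    have : L = (tickSegs text.toList).map String.ofList := by
      rw [← h]; simp [List.map_map, Function.comp_def]
    simpa [hL] using this

-- ===== VERDICT (by name: the statement is the Claim_ definition above) =====
theorem split_inline_code_py_spec : Claim_equal_split_inline_code_py := by
  intro text _
  unfold Spec_split_inline_code_py split_inline_code_py split_inline_code_py_alt
  split_ifs with h
  · rfl
  · simp only [split?_tick, aGo_eq_tag, List.nil_append]
    rw [← tickSegs_decomp]
    have := b_pass_eq_tag (tickSegs text.toList) 0
    simp only [Nat.cast_zero] at this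
    exact this.symm ▸ rfl
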